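-- pv_equiv track=rewrite | github.com/kyosukekita/ROSALIND | Bioinformatics textbook track/implement_GreedyMotifSearch.py | FormProfile
-- ===== SOURCE A (Python) =====
-- def FormProfile(motifs):
--     profile=[[0 for _ in range(4)] for _ in range(len(motifs[0]))]
--
--     for i in range(len(motifs)):
--         for j in range(len(motifs[i])):
--             if motifs[i][j]=="A":
--                 profile[j][0]+=1
--             elif motifs[i][j]=="C":
--                 profile[j][1]+=1
--             elif motifs[i][j]=="G":
--                 profile[j][2]+=1
--             else:
--                 profile[j][3]+=1
--     return profile#これが次のprofile-matrixになる
-- ===== SOURCE B (Python) =====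
-- def FormProfile(motifs):
--     n = len(motifs[0])
--     profile = []
--     for j in range(n):
--         col = [m[j] for m in motifs if j < len(m)]
--         a = col.count("A"); c = col.count("C"); g = col.count("G")
--         profile.append([a, c, g, len(col) - a - c - g])
--     return profile
-- ===== Notes on version B (the rewrite author's own statement) =====
-- stated objective: alternative
-- what changed: B traverses column-by-column: for each column index j it collects the column's characters and counts 'A','C','G', deriving the fourth entry as column length minus those three, instead of A's row-major per-char branch dispatch into a pre-built zero matrix.
import Mathlib
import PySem

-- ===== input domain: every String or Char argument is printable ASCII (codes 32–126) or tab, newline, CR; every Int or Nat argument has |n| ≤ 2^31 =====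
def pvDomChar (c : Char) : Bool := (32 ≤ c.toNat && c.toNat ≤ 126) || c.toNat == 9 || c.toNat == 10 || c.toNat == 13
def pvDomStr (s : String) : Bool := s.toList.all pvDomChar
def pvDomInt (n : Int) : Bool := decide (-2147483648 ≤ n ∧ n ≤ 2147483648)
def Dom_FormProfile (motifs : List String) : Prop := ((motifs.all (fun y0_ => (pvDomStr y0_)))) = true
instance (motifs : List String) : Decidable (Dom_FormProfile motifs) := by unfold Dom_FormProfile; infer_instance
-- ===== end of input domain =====

-- B builds the profile column-by-column (counting 'A','C','G' per column, remainder = fourth entry)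
-- instead of A's row-major char dispatch into a mutable zero matrix: alternative decomposition, same cost.


-- ===== PORT A =====
-- profile[j][k] += 1
def pyBump (row : List Int) (k : Nat) : List Int := row.set k (row.getD k 0 + 1)

def FormProfile (motifs : List String) : List (List Int) :=
  let profile := List.replicate (motifs.headD "").toList.length ([0, 0, 0, 0] : List Int)
  motifs.foldl (fun prof m =>
    (m.toList.zipIdx).foldl (fun p cj =>
      if cj.1 = 'A' then p.set cj.2 (pyBump (p.getD cj.2 []) 0)
      else if cj.1 = 'C' then p.set cj.2 (pyBump (p.getD cj.2 []) 1)
      else if cj.1 = 'G' then p.set cj.2 (pyBump (p.getD cj.2 []) 2)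
      else p.set cj.2 (pyBump (p.getD cj.2 []) 3)) prof) profile

-- ===== PORT B =====
def FormProfile_alt (motifs : List String) : List (List Int) :=
  (List.range (motifs.headD "").toList.length).map (fun j =>
    let col := motifs.filterMap (fun m => m.toList[j]?)
    let a : Int := col.count 'A'
    let c : Int := col.count 'C'
    let g : Int := col.count 'G'
    [a, c, g, (col.length : Int) - a - c - g])

-- ===== PRECONDITION & SPEC =====
-- Pre_ excludes exactly the inputs where A raises IndexError: the empty list (motifs[0]) and
-- lists containing a motif longer than motifs[0] (profile[j] out of range).
def Pre_FormProfile (motifs : List String) : Prop :=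
  motifs ≠ [] ∧ ∀ m ∈ motifs, m.toList.length ≤ (motifs.headD "").toList.length
instance (motifs : List String) : Decidable (Pre_FormProfile motifs) := by
  unfold Pre_FormProfile; infer_instance
def pvWitness_FormProfile : List String := ["ACGT", "AAXG", "TG"]

def Spec_FormProfile (motifs : List String) (out : List (List Int)) : Prop := out = FormProfile_alt motifs
instance (motifs : List String) (out : List (List Int)) : Decidable (Spec_FormProfile motifs out) := by unfold Spec_FormProfile; infer_instance

-- ===== CLAIM (what is proved, stated in full; the proofs are below) =====
def Claim_equal_FormProfile : Prop := ∀ (motifs : List String), Dom_FormProfile motifs → Pre_FormProfile motifs → Spec_FormProfile motifs (FormProfile motifs)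

-- ===== LEMMAS AND PROOFS =====

-- which of the four slots a character bumps (A's elif chain)
def kOf (c : Char) : Nat := if c = 'A' then 0 else if c = 'C' then 1 else if c = 'G' then 2 else 3

-- A's inner-loop body, written through kOf
def stepA (p : List (List Int)) (cj : Char × Nat) : List (List Int) :=
  p.set cj.2 (pyBump (p.getD cj.2 []) (kOf cj.1))

lemma stepA_eq (p : List (List Int)) (cj : Char × Nat) :
    (if cj.1 = 'A' then p.set cj.2 (pyBump (p.getD cj.2 []) 0)
     else if cj.1 = 'C' then p.set cj.2 (pyBump (p.getD cj.2 []) 1)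
     else if cj.1 = 'G' then p.set cj.2 (pyBump (p.getD cj.2 []) 2)
     else p.set cj.2 (pyBump (p.getD cj.2 []) 3)) = stepA p cj := by
  simp only [stepA, kOf]
  split_ifs <;> rfl

lemma getD_set_row (p : List (List Int)) (i j : Nat) (a : List Int) :
    (p.set i a).getD j [] = if i = j ∧ i < p.length then a else p.getD j [] := by
  simp only [List.getD_eq_getElem?_getD, List.getElem?_set]
  split_ifs <;> simp_all
  omega

-- the result of A's inner loop (one motif, chars indexed from i0), row by row
lemma inner_getD (m : List Char) (i0 j : Nat) (p : List (List Int)) :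
    ((m.zipIdx i0).foldl stepA p).getD j [] =
      if i0 ≤ j ∧ j - i0 < m.length ∧ j < p.length
      then pyBump (p.getD j []) (kOf (m.getD (j - i0) ' '))
      else p.getD j [] := by
  induction m generalizing i0 p with
  | nil => simp
  | cons c m ih =>
    rw [List.zipIdx_cons, List.foldl_cons, ih]
    simp only [stepA, List.length_set, getD_set_row, List.length_cons]
    split_ifs with h4 h5 h6 h7 h8 h9 h10
    · omega
    · omega
    · have ht : j - i0 = (j - (i0 + 1)) + 1 := by omega
      rw [ht, List.getD_cons_succ]
    · omega
    · obtain ⟨rfl, -⟩ := h8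
      simp
    · omega
    · omega
    · rfl

lemma length_inner (m : List (Char × Nat)) (p : List (List Int)) :
    (m.foldl stepA p).length = p.length := by
  induction m generalizing p with
  | nil => rfl
  | cons cj m ih =>
    rw [List.foldl_cons, ih]
    simp [stepA]

-- what one motif contributes to column j
def colStep (j : Nat) (r : List Int) (m : List Char) : List Int :=
  if j < m.length then pyBump r (kOf (m.getD j ' ')) else r

-- A's outer loop, row by row: row j only sees column j of each motif
lemma outer_getD (ms : List String) (p : List (List Int)) (j : Nat)
    (hj : j < p.length) (hle : ∀ m ∈ ms, m.toList.length ≤ p.length) :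
    (ms.foldl (fun prof m => (m.toList.zipIdx).foldl stepA prof) p).getD j [] =
      (ms.map String.toList).foldl (colStep j) (p.getD j []) := by
  induction ms generalizing p with
  | nil => rfl
  | cons s ms ih =>
    rw [List.foldl_cons, List.map_cons, List.foldl_cons,
        ih _ (by rw [length_inner]; exact hj)
          (fun m hm => by rw [length_inner]; exact hle m (List.mem_cons_of_mem _ hm))]
    congr 1
    rw [inner_getD]
    unfold colStep
    by_cases h : j < s.toList.length
    · rw [if_pos ⟨Nat.zero_le _, by omega, hj⟩, if_pos h]
      simp
    · rw [if_neg (by omega), if_neg h]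

-- folding column j's bumps from a 4-entry row yields the per-symbol counts
lemma colFold_counts (ms : List (List Char)) (j : Nat) (w x y z : Int) :
    ms.foldl (colStep j) [w, x, y, z] =
      [w + ((ms.filterMap (fun m => m[j]?)).count 'A' : Int),
       x + ((ms.filterMap (fun m => m[j]?)).count 'C' : Int),
       y + ((ms.filterMap (fun m => m[j]?)).count 'G' : Int),
       z + (((ms.filterMap (fun m => m[j]?)).length : Int)
            - ((ms.filterMap (fun m => m[j]?)).count 'A' : Int)
            - ((ms.filterMap (fun m => m[j]?)).count 'C' : Int)
            - ((ms.filterMap (fun m => m[j]?)).count 'G' : Int))] := by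
  induction ms generalizing w x y z with
  | nil => simp
  | cons m ms ih =>
    by_cases h : j < m.length
    · have hsome : m[j]? = some m[j] := List.getElem?_eq_getElem h
      have hstep : colStep j [w, x, y, z] m = pyBump [w, x, y, z] (kOf m[j]) := by
        unfold colStep
        rw [if_pos h, List.getD_eq_getElem m ' ' h]
      rw [List.foldl_cons, hstep]
      simp only [List.filterMap_cons, hsome]
      by_cases hA : m[j] = 'A'
      · have hk : pyBump [w, x, y, z] (kOf m[j]) = [w + 1, x, y, z] := by rw [hA]; rfl
        rw [hk, ih, hA]
        simp
        omega
      · by_cases hC : m[j] = 'C'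
        · have hk : pyBump [w, x, y, z] (kOf m[j]) = [w, x + 1, y, z] := by rw [hC]; rfl
          rw [hk, ih, hC]
          simp
          omega
        · by_cases hG : m[j] = 'G'
          · have hk : pyBump [w, x, y, z] (kOf m[j]) = [w, x, y + 1, z] := by rw [hG]; rfl
            rw [hk, ih, hG]
            simp
            omega
          · have hk : pyBump [w, x, y, z] (kOf m[j]) = [w, x, y, z + 1] := by
              unfold pyBump kOf
              rw [if_neg hA, if_neg hC, if_neg hG]
              rfl
            rw [hk, ih]
            simp [hA, hC, hG]
            omega
    · have hnone : m[j]? = none := List.getElem?_eq_none (by omega)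
      have hstep : colStep j [w, x, y, z] m = [w, x, y, z] := by
        unfold colStep
        rw [if_neg h]
      rw [List.foldl_cons, hstep, ih]
      simp [hnone]

lemma length_outer (ms : List String) (p : List (List Int)) :
    (ms.foldl (fun prof m => (m.toList.zipIdx).foldl stepA prof) p).length = p.length := by
  induction ms generalizing p with
  | nil => rfl
  | cons s ms ih => rw [List.foldl_cons, ih, length_inner]

lemma profile_eq (motifs : List String)
    (hall : ∀ m ∈ motifs, m.toList.length ≤ (motifs.headD "").toList.length) :
    (motifs.foldl (fun prof m => (m.toList.zipIdx).foldl stepA prof)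
        (List.replicate (motifs.headD "").toList.length ([0, 0, 0, 0] : List Int))) =
      (List.range (motifs.headD "").toList.length).map (fun j =>
        let col := motifs.filterMap (fun m => m.toList[j]?)
        let a : Int := col.count 'A'
        let c : Int := col.count 'C'
        let g : Int := col.count 'G'
        [a, c, g, (col.length : Int) - a - c - g]) := by
  apply List.ext_getElem
  · rw [length_outer]
    simp
  · intro j h1 h2
    have hj : j < (motifs.headD "").toList.length := by simpa using h2
    rw [← List.getD_eq_getElem _ [] h1]
    rw [outer_getD _ _ _ (by simpa using hj) (fun m hm => by simpa using hall m hm)]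
    have hrep : (List.replicate (motifs.headD "").toList.length
        ([0, 0, 0, 0] : List Int)).getD j [] = [0, 0, 0, 0] := by
      simp only [List.getD_eq_getElem?_getD, List.getElem?_replicate]
      rw [if_pos (by simpa [List.headD] using hj)]
      rfl
    rw [hrep, colFold_counts, List.filterMap_map]
    simp [Function.comp]

-- ===== VERDICT (by name: the statement is the Claim_ definition above) =====
theorem FormProfile_spec : Claim_equal_FormProfile := by
  intro motifs _ hpre
  obtain ⟨-, hall⟩ := hpre
  unfold Spec_FormProfile FormProfile FormProfile_alt
  simp only [stepA_eq]
  exact profile_eq motifs hall
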